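-- pv_equiv track=rewrite | github.com/seanfromthefuteurprivate/Intellibot | wsb_snake/engines/precious_metals_scalper.py | _get_affected_symbols
-- ===== SOURCE A (Python) =====
-- from typing import Dict, List, Optional, Tuple, Any
--
-- def _get_affected_symbols(keywords: List[str]) -> List[str]:
--     """Determine which metals are most affected."""
--     symbols = ['GLD', 'SLV']  # Default both
--
--     if any('gold' in kw or 'bullion' in kw for kw in keywords):
--         symbols = ['GLD', 'IAU', 'GOLD']
--     if any('silver' in kw for kw in keywords):
--         symbols = ['SLV', 'SILVER']
--     if any('platinum' in kw or 'palladium' in kw for kw in keywords):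
--         symbols.append('PPLT')
--
--     return symbols
-- ===== SOURCE B (Python) =====
-- def _get_affected_symbols(keywords):
--     """Determine which metals are most affected."""
--     gold = silver = plat = False
--     for kw in keywords:
--         gold = gold or 'gold' in kw or 'bullion' in kw
--         silver = silver or 'silver' in kw
--         plat = plat or 'platinum' in kw or 'palladium' in kw
--     if silver:
--         symbols = ['SLV', 'SILVER']
--     elif gold:
--         symbols = ['GLD', 'IAU', 'GOLD']
--     else:
--         symbols = ['GLD', 'SLV']
--     if plat:
--         symbols.append('PPLT')
--     return symbols
-- ===== Notes on version B (the rewrite author's own statement) =====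
-- stated objective: alternative
-- what changed: B replaces A's three separate any() scans over the keyword list with a single loop that OR-accumulates three flags, then selects the symbol list by a flat if/elif/else on the flags instead of A's reassignment cascade.
import Mathlib
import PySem

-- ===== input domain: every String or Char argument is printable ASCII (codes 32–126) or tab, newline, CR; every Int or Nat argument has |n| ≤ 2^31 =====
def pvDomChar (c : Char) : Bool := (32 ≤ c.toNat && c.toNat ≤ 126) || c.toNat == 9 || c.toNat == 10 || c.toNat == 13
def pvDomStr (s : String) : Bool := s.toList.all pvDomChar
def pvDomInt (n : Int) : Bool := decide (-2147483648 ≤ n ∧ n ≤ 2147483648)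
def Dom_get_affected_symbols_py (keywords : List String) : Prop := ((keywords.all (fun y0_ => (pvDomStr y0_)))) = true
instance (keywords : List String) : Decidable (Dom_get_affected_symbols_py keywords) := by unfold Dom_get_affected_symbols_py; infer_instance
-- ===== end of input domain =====

-- B replaces A's three any() scans with one flag-accumulating loop and a flat if/elif/else (alternative decomposition, same cost).
-- ===== PORT A =====
-- Port of A: default list, then three any-scans reassigning/appending in order.
def get_affected_symbols_py (keywords : List String) : List String :=
  let symbols := ["GLD", "SLV"]
  let symbols :=
    if keywords.any (fun kw => PySem.Str.isIn "gold" kw || PySem.Str.isIn "bullion" kw) then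
      ["GLD", "IAU", "GOLD"] else symbols
  let symbols :=
    if keywords.any (fun kw => PySem.Str.isIn "silver" kw) then
      ["SLV", "SILVER"] else symbols
  let symbols :=
    if keywords.any (fun kw => PySem.Str.isIn "platinum" kw || PySem.Str.isIn "palladium" kw) then
      symbols ++ ["PPLT"] else symbols
  symbols

-- ===== PORT B =====
-- Port of B: one fold accumulating three flags, then a flat if/elif/else.
def get_affected_symbols_py_alt (keywords : List String) : List String :=
  let flags := keywords.foldl
    (fun (f : Bool × Bool × Bool) kw =>
      (f.1 || PySem.Str.isIn "gold" kw || PySem.Str.isIn "bullion" kw,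
       f.2.1 || PySem.Str.isIn "silver" kw,
       f.2.2 || PySem.Str.isIn "platinum" kw || PySem.Str.isIn "palladium" kw))
    (false, false, false)
  let symbols :=
    if flags.2.1 then ["SLV", "SILVER"]
    else if flags.1 then ["GLD", "IAU", "GOLD"]
    else ["GLD", "SLV"]
  if flags.2.2 then symbols ++ ["PPLT"] else symbols

-- ===== PRECONDITION & SPEC =====
def Spec_get_affected_symbols_py (keywords : List String) (out : List String) : Prop := out = get_affected_symbols_py_alt keywords
instance (keywords : List String) (out : List String) : Decidable (Spec_get_affected_symbols_py keywords out) := by unfold Spec_get_affected_symbols_py; infer_instance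

-- ===== CLAIM (what is proved, stated in full; the proofs are below) =====
def Claim_equal_get_affected_symbols_py : Prop := ∀ (keywords : List String), Dom_get_affected_symbols_py keywords → Spec_get_affected_symbols_py keywords (get_affected_symbols_py keywords)

-- ===== LEMMAS AND PROOFS =====

theorem flags_eq_any (keywords : List String) (g s p : Bool) :
    keywords.foldl
      (fun (f : Bool × Bool × Bool) kw =>
        (f.1 || PySem.Str.isIn "gold" kw || PySem.Str.isIn "bullion" kw,
         f.2.1 || PySem.Str.isIn "silver" kw,
         f.2.2 || PySem.Str.isIn "platinum" kw || PySem.Str.isIn "palladium" kw))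
      (g, s, p)
    = (g || keywords.any (fun kw => PySem.Str.isIn "gold" kw || PySem.Str.isIn "bullion" kw),
       s || keywords.any (fun kw => PySem.Str.isIn "silver" kw),
       p || keywords.any (fun kw => PySem.Str.isIn "platinum" kw || PySem.Str.isIn "palladium" kw)) := by
  induction keywords generalizing g s p with
  | nil => simp
  | cons kw rest ih =>
      simp only [List.foldl_cons, List.any_cons, ih]
      simp [Bool.or_assoc]

-- ===== VERDICT (by name: the statement is the Claim_ definition above) =====
theorem get_affected_symbols_py_spec : Claim_equal_get_affected_symbols_py := by
  intro keywords _
  unfold Spec_get_affected_symbols_py get_affected_symbols_py get_affected_symbols_py_alt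
  simp only [flags_eq_any, Bool.false_or]
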